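-- pv_equiv track=rewrite | github.com/Skeeter2600/advent-of-code-2023 | day7/camel_cards.py | sort_pile_original
-- ===== SOURCE A (Python) =====
-- CARD_VALUES = {
--     '2': 1,
--     '3': 2,
--     '4': 3,
--     '5': 4,
--     '6': 5,
--     '7': 6,
--     '8': 7,
--     '9': 8,
--     'T': 9,
--     'J': 10,
--     'Q': 11,
--     'K': 12,
--     'A': 13
-- }
--
-- def sort_pile_original(e):
--     card_num = 0
--     i = len(e[0])
--     for card in e[0]:
--         mult = int(str(1) + str(0)*(i*2))
--         card_num += CARD_VALUES[card] * mult
--         i -= 1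
--     return card_num
-- ===== SOURCE B (Python) =====
-- CARD_VALUES = {
--     '2': 1, '3': 2, '4': 3, '5': 4, '6': 5, '7': 6, '8': 7,
--     '9': 8, 'T': 9, 'J': 10, 'Q': 11, 'K': 12, 'A': 13
-- }
--
-- def sort_pile_original(e):
--     # Walk the hand right-to-left with a running place value (100, 10000, ...)
--     # instead of rebuilding each power via string construction and parsing.
--     total = 0
--     place = 100
--     for card in reversed(e[0]):
--         total += CARD_VALUES[card] * place
--         place *= 100
--     return total
-- ===== Notes on version B (the rewrite author's own statement) =====
-- stated objective: faster
-- what changed: Instead of A's left-to-right loop that for each card builds and parses the string '1'+'0'*(2*i) to get its multiplier, B walks the hand right-to-left keeping a running place value multiplied by 100 each step, so no string building or int() parsing occurs.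
import Mathlib
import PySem

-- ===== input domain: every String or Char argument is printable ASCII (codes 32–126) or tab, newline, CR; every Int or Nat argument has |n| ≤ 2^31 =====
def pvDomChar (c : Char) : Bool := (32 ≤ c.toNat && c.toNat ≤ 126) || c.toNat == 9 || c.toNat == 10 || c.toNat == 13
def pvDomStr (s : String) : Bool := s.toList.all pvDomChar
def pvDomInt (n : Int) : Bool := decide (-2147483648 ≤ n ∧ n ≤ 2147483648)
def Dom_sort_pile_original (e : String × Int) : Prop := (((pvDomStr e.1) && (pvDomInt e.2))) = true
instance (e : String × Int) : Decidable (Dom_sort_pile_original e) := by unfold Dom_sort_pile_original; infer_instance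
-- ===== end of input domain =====

-- B walks the hand right-to-left with a running place value (×100 per step) instead of A's
-- per-card build-and-parse of the string '1'+'0'*(2*i): O(n) instead of O(n^2).

-- ===== PORT A =====
-- the module-level dict CARD_VALUES (chars, since the hand is iterated character by character)
def pvCardValues : PySem.Dict Char Int :=
  PySem.Dict.ofList [('2', 1), ('3', 2), ('4', 3), ('5', 4), ('6', 5), ('7', 6), ('8', 7),
   ('9', 8), ('T', 9), ('J', 10), ('Q', 11), ('K', 12), ('A', 13)]

-- hand port of Python int(s) for the strings A feeds it ('1' followed by zeros: nonempty, all
-- digits, no sign/space/underscore) — exact on exactly those strings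
def pvParseDigits (cs : List Char) : Int :=
  cs.foldl (fun acc c => acc * 10 + ((c.toNat : Int) - 48)) 0

def sort_pile_original (e : String × Int) : Int :=
  -- card_num = 0; i = len(e[0]); for card in e[0]: mult = int(str(1)+str(0)*(i*2)); card_num += CARD_VALUES[card]*mult; i -= 1
  -- CARD_VALUES[card] raises KeyError on a card outside the dict: excluded by Pre_ (getD 0 there)
  (e.1.toList.foldl
    (fun (s : Int × Int) card =>
      let mult := pvParseDigits (PySem.Int.toChars 1 ++ PySem.List.pyRepeat (PySem.Int.toChars 0) (s.2 * 2))
      (s.1 + (PySem.Dict.get? pvCardValues card).getD 0 * mult, s.2 - 1))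
    (0, (PySem.Str.len e.1 : Int))).1

-- ===== PORT B =====
def sort_pile_original_alt (e : String × Int) : Int :=
  -- total = 0; place = 100; for card in reversed(e[0]): total += CARD_VALUES[card]*place; place *= 100; return total
  (e.1.toList.reverse.foldl
    (fun (s : Int × Int) card =>
      (s.1 + (PySem.Dict.get? pvCardValues card).getD 0 * s.2, s.2 * 100))
    (0, 100)).1

-- ===== PRECONDITION & SPEC =====
-- Pre_ excludes exactly the hands containing a character that is not a CARD_VALUES key,
-- on which the Python A raises KeyError.
def Pre_sort_pile_original (e : String × Int) : Prop :=
  e.1.toList.all (fun c => (PySem.Dict.get? pvCardValues c).isSome) = true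
instance (e : String × Int) : Decidable (Pre_sort_pile_original e) := by
  unfold Pre_sort_pile_original; infer_instance

def pvWitness_sort_pile_original : (String × Int) := ("AKQ72", 3)

def Spec_sort_pile_original (e : String × Int) (out : Int) : Prop := out = sort_pile_original_alt e
instance (e : String × Int) (out : Int) : Decidable (Spec_sort_pile_original e out) := by
  unfold Spec_sort_pile_original; infer_instance

-- ===== CLAIM (what is proved, stated in full; the proofs are below) =====
def Claim_equal_sort_pile_original : Prop :=
  ∀ (e : String × Int), Dom_sort_pile_original e → Pre_sort_pile_original e →
    Spec_sort_pile_original e (sort_pile_original e)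

-- ===== LEMMAS AND PROOFS =====

-- abbreviate the dict value of a card
def pvVal (c : Char) : Int := (PySem.Dict.get? pvCardValues c).getD 0

-- the common reference value both ports are reduced to: Horner's form
def pvHorner (xs : List Char) : Int :=
  xs.foldl (fun acc card => acc * 100 + pvVal card) 0

-- int('1' + '0'*k) = 10^k, via the digit fold
theorem pvParseDigits_replicate (k : Nat) (a : Int) :
    (List.replicate k '0').foldl (fun acc c => acc * 10 + ((c.toNat : Int) - 48)) a = a * 10 ^ k := by
  induction k generalizing a with
  | zero => simp
  | succ n ih =>
    rw [List.replicate_succ, List.foldl_cons, ih]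
    push_cast
    ring

theorem pvParse_one_zeros (k : Nat) :
    pvParseDigits ('1' :: List.replicate k '0') = 10 ^ k := by
  unfold pvParseDigits
  rw [List.foldl_cons, pvParseDigits_replicate]
  rw [show (0:Int) * 10 + (('1'.toNat : Int) - 48) = 1 from by decide, one_mul]

-- A's accumulator is additive in its first component
theorem pvA_add (xs : List Char) (c i : Int) :
    (xs.foldl
      (fun (s : Int × Int) card =>
        let mult := pvParseDigits (PySem.Int.toChars 1 ++ PySem.List.pyRepeat (PySem.Int.toChars 0) (s.2 * 2))
        (s.1 + pvVal card * mult, s.2 - 1)) (c, i)).1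
    = c + (xs.foldl
      (fun (s : Int × Int) card =>
        let mult := pvParseDigits (PySem.Int.toChars 1 ++ PySem.List.pyRepeat (PySem.Int.toChars 0) (s.2 * 2))
        (s.1 + pvVal card * mult, s.2 - 1)) (0, i)).1 := by
  induction xs generalizing c i with
  | nil => simp
  | cons x xs ih =>
    simp only [List.foldl_cons]
    rw [ih, ih (0 + pvVal x * _)]
    ring

-- Horner's accumulator shift
theorem pvH_shift (xs : List Char) (a : Int) :
    xs.foldl (fun acc card => acc * 100 + pvVal card) a
    = a * 100 ^ xs.length + pvHorner xs := by
  induction xs generalizing a with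
  | nil => simp [pvHorner]
  | cons x xs ih =>
    simp only [List.foldl_cons, List.length_cons, pvHorner]
    rw [ih (a * 100 + pvVal x), ih (0 * 100 + pvVal x)]
    ring

-- Horner's step on a cons, in power form
theorem pvHorner_cons (x : Char) (xs : List Char) :
    pvHorner (x :: xs) = pvVal x * 100 ^ xs.length + pvHorner xs := by
  unfold pvHorner
  rw [List.foldl_cons, pvH_shift]
  simp only [pvHorner]
  ring

-- A's loop, started with i = length, computes Horner * 100
theorem pvA_eq_horner (xs : List Char) :
    (xs.foldl
      (fun (s : Int × Int) card =>
        let mult := pvParseDigits (PySem.Int.toChars 1 ++ PySem.List.pyRepeat (PySem.Int.toChars 0) (s.2 * 2))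
        (s.1 + pvVal card * mult, s.2 - 1)) (0, (xs.length : Int))).1
    = pvHorner xs * 100 := by
  induction xs with
  | nil => simp [pvHorner]
  | cons x xs ih =>
    simp only [List.foldl_cons, List.length_cons]
    have h1 : PySem.Int.toChars 1 = ['1'] := by decide
    have h0 : PySem.Int.toChars 0 = ['0'] := by decide
    have hk : ((((xs.length + 1 : Nat) : Int)) * 2).toNat = 2 * (xs.length + 1) := by
      push_cast; omega
    have hmult : pvParseDigits (PySem.Int.toChars 1 ++
        PySem.List.pyRepeat (PySem.Int.toChars 0) (((xs.length + 1 : Nat) : Int) * 2))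
        = 100 ^ (xs.length + 1) := by
      rw [h1, h0, PySem.List.pyRepeat_singleton, hk, List.singleton_append,
        pvParse_one_zeros, pow_mul]
      norm_num
    have hi : (((xs.length + 1 : Nat) : Int)) - 1 = (xs.length : Int) := by push_cast; ring
    simp only [hmult, hi]
    rw [pvA_add, ih, pvHorner_cons]
    ring

-- B's right-to-left loop: full characterisation of both state components
theorem pvB_state (xs : List Char) (t p : Int) :
    xs.reverse.foldl
      (fun (s : Int × Int) card =>
        (s.1 + pvVal card * s.2, s.2 * 100)) (t, p)
    = (t + p * pvHorner xs, p * 100 ^ xs.length) := by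
  induction xs generalizing t p with
  | nil => simp [pvHorner]
  | cons x xs ih =>
    simp only [List.reverse_cons, List.foldl_append, List.foldl_cons, List.foldl_nil,
      List.length_cons, ih]
    rw [pvHorner_cons]
    simp only [Prod.mk.injEq]
    exact ⟨by ring, by ring⟩

-- ===== VERDICT (by name: the statement is the Claim_ definition above) =====
theorem sort_pile_original_spec : Claim_equal_sort_pile_original := by
  intro e _ _
  unfold Spec_sort_pile_original sort_pile_original sort_pile_original_alt
  rw [PySem.Str.len_eq]
  have hA := pvA_eq_horner e.1.toList
  have hB := pvB_state e.1.toList 0 100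
  simp only [pvVal] at hA hB
  rw [hA, hB]
  simp
  ring
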